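-- pv_equiv track=rewrite | github.com/iamspruce/Fennai | functions/proxy/routes/voice_clone.py | count_speakers_in_text
-- ===== SOURCE A (Python) =====
-- def count_speakers_in_text(text: str) -> int:
--     """
--     Count unique speakers in multi-character text.
--
--     Args:
--         text: Multi-line text with "Speaker N: dialogue" format
--
--     Returns:
--         Number of unique speakers
--     """
--     if not text:
--         return 0
--
--     lines = text.strip().split('\n')
--     speakers = set()
--
--     for line in lines:
--         if ':' in line:
--             speaker_label = line.split(':', 1)[0].strip()
--             if speaker_label:
--                 speakers.add(speaker_label)
--
--     return len(speakers)
-- ===== SOURCE B (Python) =====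
-- def count_speakers_in_text(text: str) -> int:
--     """One-pass character state machine: no strip/split of the whole text,
--     each line's pre-colon prefix is accumulated and finalized at its first colon."""
--     speakers = set()
--     buf = []
--     has_colon = False
--     for ch in text + "\n":
--         if ch == "\n":
--             buf = []
--             has_colon = False
--         elif ch == ":" and not has_colon:
--             label = "".join(buf).strip()
--             if label:
--                 speakers.add(label)
--             has_colon = True
--         else:
--             if not has_colon:
--                 buf.append(ch)
--     return len(speakers)
-- ===== Notes on version B (the rewrite author's own statement) =====
-- stated objective: alternative
-- what changed: Replaces strip-then-split-lines-then-per-line-split/strip with a single character-level state machine over the raw text that accumulates each line's pre-colon prefix and finalizes the stripped label at the line's first colon.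
import Mathlib
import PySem

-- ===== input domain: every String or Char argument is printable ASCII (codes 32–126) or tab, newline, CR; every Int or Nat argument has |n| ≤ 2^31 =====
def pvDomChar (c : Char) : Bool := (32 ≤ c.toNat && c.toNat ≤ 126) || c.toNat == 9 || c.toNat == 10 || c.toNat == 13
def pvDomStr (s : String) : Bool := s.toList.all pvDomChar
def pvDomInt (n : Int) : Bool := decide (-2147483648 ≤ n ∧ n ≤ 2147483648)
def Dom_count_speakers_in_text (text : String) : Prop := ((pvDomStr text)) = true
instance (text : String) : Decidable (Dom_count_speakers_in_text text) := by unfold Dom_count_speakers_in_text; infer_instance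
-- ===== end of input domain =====

-- B replaces A's strip/split-lines/per-line-split pipeline by a single character-level
-- state machine over the raw text; same result, alternative structure (no speed claim).


-- ===== PORT A =====
-- A's loop body: if ':' in line: label = line.split(':', 1)[0].strip(); if label: speakers.add(label)
def aStep (s : PySem.Set (List Char)) (line : List Char) : PySem.Set (List Char) :=
  if PySem.Chars.isIn [':'] line then
    -- line.split(':', 1)[0]: split always returns a nonempty list, so [0] never raises
    let label := PySem.Chars.strip ((PySem.List.pyGet? (PySem.Chars.splitOnMax line [':'] 1) 0).getD [])
    if label ≠ [] then PySem.Set.add s label else s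
  else s

def count_speakers_in_text (text : String) : Int :=
  if text = "" then 0
  else
    let lines := PySem.Chars.splitOn (PySem.Chars.strip text.toList) ['\n']
    let speakers := lines.foldl aStep PySem.Set.empty
    (PySem.Set.len speakers : Int)

-- ===== PORT B =====
-- B's loop body over the state (speakers, buf, has_colon), for each character of text + "\n"
def bStep (st : PySem.Set (List Char) × List Char × Bool) (ch : Char) :
    PySem.Set (List Char) × List Char × Bool :=
  if ch = '\n' then (st.1, [], false)
  else if ch = ':' ∧ st.2.2 = false then
    let label := PySem.Chars.strip st.2.1
    (if label ≠ [] then PySem.Set.add st.1 label else st.1, st.2.1, true)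
  else if st.2.2 = false then (st.1, st.2.1 ++ [ch], false)
  else st

def count_speakers_in_text_alt (text : String) : Int :=
  let fin := (text.toList ++ ['\n']).foldl bStep (PySem.Set.empty, [], false)
  (PySem.Set.len fin.1 : Int)

-- ===== PRECONDITION & SPEC =====
def Spec_count_speakers_in_text (text : String) (out : Int) : Prop := out = count_speakers_in_text_alt text
instance (text : String) (out : Int) : Decidable (Spec_count_speakers_in_text text out) := by unfold Spec_count_speakers_in_text; infer_instance

-- ===== CLAIM (what is proved, stated in full; the proofs are below) =====
def Claim_equal_count_speakers_in_text : Prop := ∀ (text : String), Dom_count_speakers_in_text text → Spec_count_speakers_in_text text (count_speakers_in_text text)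

-- ===== LEMMAS AND PROOFS =====

-- structural split of a char list on '\n'
def mySplit : List Char → List (List Char)
  | [] => [[]]
  | c :: r => if c = '\n' then [] :: mySplit r else (c :: (mySplit r).headD []) :: (mySplit r).tail

-- per-line label and the common per-line set update both programs perform
def labelOf (l : List Char) : List Char := PySem.Chars.strip (l.takeWhile (fun c => c != ':'))
def lineUpd (s : PySem.Set (List Char)) (l : List Char) : PySem.Set (List Char) :=
  if ':' ∈ l then (if labelOf l ≠ [] then PySem.Set.add s (labelOf l) else s) else s
def goodLabels (x : List Char) : List (List Char) :=
  ((mySplit x).filter (fun l => decide (':' ∈ l) && decide (labelOf l ≠ []))).map labelOf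

theorem mySplit_ne_nil (l : List Char) : mySplit l ≠ [] := by
  cases l with
  | nil => simp [mySplit]
  | cons c r => simp only [mySplit]; split <;> simp

theorem mySplit_rep (l : List Char) : mySplit l = (mySplit l).headD [] :: (mySplit l).tail := by
  cases h : mySplit l with
  | nil => exact absurd h (mySplit_ne_nil l)
  | cons a t => simp

theorem go_nl : ∀ (fuel : Nat) (l cur : List Char) (acc : List (List Char)), l.length < fuel →
    PySem.Chars.splitOn.go ['\n'] fuel l cur acc =
      acc.reverse ++ (cur.reverse ++ (mySplit l).headD []) :: (mySplit l).tail := by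
  intro fuel
  induction fuel with
  | zero => intro l cur acc h; omega
  | succ n ih =>
    intro l cur acc h
    cases l with
    | nil =>
      rw [PySem.Chars.splitOn.go.eq_def]
      simp [mySplit]
    | cons c rest =>
      rw [PySem.Chars.splitOn.go.eq_def]
      simp only []
      by_cases hc : c = '\n'
      · subst hc
        have hpre : (['\n'] : List Char).isPrefixOf ('\n' :: rest) = true := by simp [List.isPrefixOf]
        simp only [hpre, if_true, List.drop_succ_cons, List.drop_zero, List.length_cons, List.length_nil]
        rw [ih rest [] _ (by simpa using Nat.lt_of_succ_lt_succ h)]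
        simp only [mySplit, if_true, List.reverse_nil, List.nil_append, List.reverse_cons,
          List.headD_cons, List.tail_cons, List.append_assoc, List.singleton_append, List.cons_append]
        rw [← mySplit_rep rest]
        simp
      · have hpre : (['\n'] : List Char).isPrefixOf (c :: rest) = false := by
          simp only [List.isPrefixOf, Bool.and_eq_false_iff, beq_eq_false_iff_ne, ne_eq]
          left; exact fun hh => hc hh.symm
        simp only [hpre, Bool.false_eq_true, if_false]
        rw [ih rest (c :: cur) acc (by simpa using Nat.lt_of_succ_lt_succ h)]
        rw [mySplit_rep rest]
        simp [mySplit, hc]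

theorem splitOn_newline (l : List Char) : PySem.Chars.splitOn l ['\n'] = mySplit l := by
  unfold PySem.Chars.splitOn
  rw [go_nl (l.length + 1) l [] [] (by omega)]
  simpa using (mySplit_rep l).symm

theorem go0 : ∀ (fuel : Nat) (l cur : List Char) (acc : List (List Char)),
    PySem.Chars.splitOnMax.go [':'] fuel 0 l cur acc = ((cur.reverse ++ l) :: acc).reverse := by
  intro fuel l cur acc
  rw [PySem.Chars.splitOnMax.go.eq_def]
  cases fuel with
  | zero => rfl
  | succ n => cases l with
    | nil => simp
    | cons c rest => simp

theorem go1 : ∀ (fuel : Nat) (l cur : List Char) (acc : List (List Char)), l.length < fuel →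
    PySem.Chars.splitOnMax.go [':'] fuel 1 l cur acc =
      acc.reverse ++ (cur.reverse ++ l.takeWhile (fun c => c != ':')) ::
        (if ':' ∈ l then [(l.dropWhile (fun c => c != ':')).tail] else []) := by
  intro fuel
  induction fuel with
  | zero => intro l cur acc h; omega
  | succ n ih =>
    intro l cur acc h
    rw [PySem.Chars.splitOnMax.go.eq_def]
    cases l with
    | nil => simp
    | cons c rest =>
      simp only [List.length_cons] at h
      by_cases hc : c = ':'
      · subst hc
        have hpre : ([':'] : List Char).isPrefixOf (':' :: rest) = true := by
          simp [List.isPrefixOf]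
        simp only [hpre, if_true, Nat.succ_ne_zero, if_neg (by omega : ¬(1:Nat) = 0)]
        rw [show (1 - 1 : Nat) = 0 from rfl]
        rw [show List.drop ([':'] : List Char).length (':' :: rest) = rest by simp]
        rw [go0]
        simp [List.takeWhile, List.dropWhile]
      · have hpre : ([':'] : List Char).isPrefixOf (c :: rest) = false := by
          simp only [List.isPrefixOf, Bool.and_eq_false_iff, beq_eq_false_iff_ne, ne_eq]
          left; exact fun hh => hc hh.symm
        simp only [hpre, Bool.false_eq_true, if_false, if_neg (by omega : ¬(1:Nat) = 0)]
        rw [ih rest (c :: cur) acc (by omega)]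
        have htw : (c :: rest).takeWhile (fun c => c != ':') = c :: rest.takeWhile (fun c => c != ':') := by
          simp [List.takeWhile_cons, hc]
        have hdw : (c :: rest).dropWhile (fun c => c != ':') = rest.dropWhile (fun c => c != ':') := by
          simp [List.dropWhile_cons, hc]
        rw [htw, hdw]
        by_cases hmem : ':' ∈ rest <;>
          simp [List.mem_cons, hmem, Ne.symm hc]

theorem isIn_singleton (c : Char) (l : List Char) :
    PySem.Chars.isIn [c] l = true ↔ c ∈ l := by
  rw [PySem.Chars.isIn_iff_infix]
  constructor
  · intro hinf
    exact List.singleton_sublist.mp hinf.sublist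
  · intro hm
    obtain ⟨s, t, rfl⟩ := List.append_of_mem hm
    exact ⟨s, t, by simp⟩

theorem splitOnMax_head (l : List Char) :
    (PySem.List.pyGet? (PySem.Chars.splitOnMax l [':'] 1) 0).getD [] = l.takeWhile (fun c => c != ':') := by
  unfold PySem.Chars.splitOnMax
  rw [if_neg (by omega)]
  rw [show ((1:Int).toNat) = 1 from rfl]
  rw [go1 (l.length + 1) l [] [] (by omega)]
  rw [show ((0:Int)) = ((0:Nat):Int) from rfl, PySem.List.pyGet?_natCast]
  simp

theorem aStep_eq_lineUpd (s : PySem.Set (List Char)) (l : List Char) : aStep s l = lineUpd s l := by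
  unfold aStep lineUpd
  rw [splitOnMax_head]
  by_cases hm : ':' ∈ l
  · rw [if_pos ((isIn_singleton ':' l).mpr hm), if_pos hm]
    rfl
  · rw [if_neg (fun hh => hm ((isIn_singleton ':' l).mp hh)), if_neg hm]

theorem lineUpd_eq_if (s : PySem.Set (List Char)) (l : List Char) :
    lineUpd s l = if (decide (':' ∈ l) && decide (labelOf l ≠ [])) then PySem.Set.add s (labelOf l) else s := by
  unfold lineUpd
  by_cases h1 : ':' ∈ l <;> by_cases h2 : labelOf l ≠ [] <;> simp [h1, h2]

theorem foldl_lineUpd_eq (x : List Char) (s : PySem.Set (List Char)) :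
    (mySplit x).foldl lineUpd s = (goodLabels x).foldl PySem.Set.add s := by
  unfold goodLabels
  rw [List.foldl_map]
  rw [← PySem.List.foldl_if_eq_foldl_filter (fun l => decide (':' ∈ l) && decide (labelOf l ≠ []))
       (fun acc l => PySem.Set.add acc (labelOf l)) (mySplit x) s]
  exact PySem.List.foldl_congr_mem (mySplit x) _ _ s (fun acc l _ => lineUpd_eq_if acc l)

theorem takeWhile_no_colon (buf h : List Char) (hb : ':' ∉ buf) :
    (buf ++ ':' :: h).takeWhile (fun c => c != ':') = buf := by
  induction buf with
  | nil => simp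
  | cons b bs ih =>
    have hb1 : b ≠ ':' := fun hh => hb (hh ▸ List.mem_cons_self ..)
    have hb2 : ':' ∉ bs := fun hh => hb (List.mem_cons_of_mem _ hh)
    simp only [List.cons_append, List.takeWhile_cons]
    simp [hb1, ih hb2]

theorem lineUpd_no_colon (s : PySem.Set (List Char)) (buf : List Char) (hb : ':' ∉ buf) :
    lineUpd s buf = s := by
  unfold lineUpd
  rw [if_neg hb]

theorem machine (t : List Char) : ∀ (s : PySem.Set (List Char)) (buf : List Char) (hc : Bool),
    (hc = false → ':' ∉ buf) →
    List.foldl bStep (s, buf, hc) (t ++ ['\n']) =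
      (if hc then ((mySplit t).tail.foldl lineUpd s, [], false)
       else (((buf ++ (mySplit t).headD []) :: (mySplit t).tail).foldl lineUpd s, [], false)) := by
  induction t with
  | nil =>
    intro s buf hc hb
    have hstep : bStep (s, buf, hc) '\n' = (s, [], false) := by simp [bStep]
    cases hc with
    | false =>
      simp only [List.nil_append, List.foldl_cons, List.foldl_nil, hstep]
      have hms : mySplit ([] : List Char) = [[]] := rfl
      simp only [hms, Bool.false_eq_true, if_false, List.headD_cons, List.tail_cons,
        List.append_nil, List.foldl_cons, List.foldl_nil]
      rw [lineUpd_no_colon s buf (hb rfl)]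
    | true =>
      simp only [List.nil_append, List.foldl_cons, List.foldl_nil, hstep]
      simp [mySplit]
  | cons c t' ih =>
    intro s buf hc hb
    rw [List.cons_append, List.foldl_cons]
    by_cases hnl : c = '\n'
    · subst hnl
      have hstep : bStep (s, buf, hc) '\n' = (s, [], false) := by simp [bStep]
      rw [hstep, ih s [] false (fun _ => by simp)]
      have hms : mySplit ('\n' :: t') = [] :: mySplit t' := by simp [mySplit]
      cases hc with
      | false =>
        simp only [Bool.false_eq_true, if_false, hms, List.headD_cons, List.tail_cons,
          List.nil_append, List.foldl_cons]
        rw [List.append_nil, lineUpd_no_colon s buf (hb rfl)]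
        conv_rhs => rw [mySplit_rep t']
        rw [List.foldl_cons]
      | true =>
        simp only [Bool.false_eq_true, if_false, if_true, hms, List.tail_cons, List.nil_append]
        rw [← mySplit_rep t']
    · have hms : mySplit (c :: t') = (c :: (mySplit t').headD []) :: (mySplit t').tail := by
        simp [mySplit, hnl]
      cases hc with
      | true =>
        have hstep : bStep (s, buf, true) c = (s, buf, true) := by
          by_cases hco : c = ':' <;> simp [bStep, hnl, hco]
        rw [hstep, ih s buf true (by simp)]
        simp [hms]
      | false =>
        have hbuf := hb rfl
        by_cases hco : c = ':'
        · subst hco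
          have hstep : bStep (s, buf, false) ':' =
              (if PySem.Chars.strip buf ≠ [] then PySem.Set.add s (PySem.Chars.strip buf) else s, buf, true) := by
            simp [bStep, hnl]
          rw [hstep, ih _ buf true (by simp)]
          simp only [if_true, Bool.false_eq_true, if_false, hms, List.headD_cons, List.tail_cons,
            List.foldl_cons]
          have hl : lineUpd s (buf ++ ':' :: (mySplit t').headD []) =
              (if PySem.Chars.strip buf ≠ [] then PySem.Set.add s (PySem.Chars.strip buf) else s) := by
            unfold lineUpd labelOf
            rw [if_pos (by simp), takeWhile_no_colon _ _ hbuf]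
          rw [hl]
        · have hstep : bStep (s, buf, false) c = (s, buf ++ [c], false) := by
            simp [bStep, hnl, hco]
          rw [hstep, ih s (buf ++ [c]) false
            (fun _ => by
              simp only [List.mem_append, List.mem_singleton]
              push Not
              exact ⟨hbuf, fun hh => hco hh.symm⟩)]
          simp only [Bool.false_eq_true, if_false, hms, List.headD_cons, List.tail_cons]
          rw [List.append_assoc, List.singleton_append]

theorem isspace_ne_colon {c : Char} (h : PySem.Chars.isspace c = true) : c ≠ ':' := by
  intro hh; subst hh; simp [PySem.Chars.isspace] at h

theorem strip_cons_ws {c : Char} (x : List Char) (h : PySem.Chars.isspace c = true) :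
    PySem.Chars.strip (c :: x) = PySem.Chars.strip x := by
  unfold PySem.Chars.strip PySem.Chars.lstrip
  rw [List.dropWhile_cons_of_pos h]

theorem labelOf_cons_ws {c : Char} (x : List Char) (h : PySem.Chars.isspace c = true) :
    labelOf (c :: x) = labelOf x := by
  unfold labelOf
  rw [List.takeWhile_cons_of_pos (by simp [isspace_ne_colon h]), strip_cons_ws _ h]

theorem gl_cons_ws {c : Char} (v : List Char) (h : PySem.Chars.isspace c = true) :
    goodLabels (c :: v) = goodLabels v := by
  unfold goodLabels
  by_cases hnl : c = '\n'
  · subst hnl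
    have hms : mySplit ('\n' :: v) = [] :: mySplit v := by simp [mySplit]
    rw [hms, List.filter_cons]
    simp
  · cases hmv : mySplit v with
    | nil => exact absurd hmv (mySplit_ne_nil v)
    | cons hd tl =>
      have hms : mySplit (c :: v) = (c :: hd) :: tl := by simp [mySplit, hnl, hmv]
      rw [hms, List.filter_cons, List.filter_cons]
      have hne : ':' ≠ c := fun hh => (isspace_ne_colon h) hh.symm
      have hmem : (':' ∈ c :: hd) ↔ (':' ∈ hd) := by simp [List.mem_cons, hne]
      have hlab := labelOf_cons_ws hd h
      by_cases h1 : ':' ∈ hd <;> by_cases h2 : labelOf hd ≠ [] <;>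
        simp [h1, h2, hmem, hlab, hne]

theorem takeWhile_append_mem_false (l₁ l₂ : List Char) (hx : ':' ∈ l₁) :
    (l₁ ++ l₂).takeWhile (fun c => c != ':') = l₁.takeWhile (fun c => c != ':') := by
  induction l₁ with
  | nil => simp at hx
  | cons a l ih =>
    by_cases ha : a = ':'
    · subst ha; simp [List.takeWhile_cons]
    · have : ':' ∈ l := by
        rcases List.mem_cons.mp hx with hh | hh
        · exact absurd hh.symm ha
        · exact hh
      simp [List.takeWhile_cons, ha, ih this]

theorem mySplit_append_nl (u : List Char) : mySplit (u ++ ['\n']) = mySplit u ++ [[]] := by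
  induction u with
  | nil => simp [mySplit]
  | cons d u ih =>
    by_cases hd : d = '\n'
    · subst hd
      simp only [List.cons_append, mySplit, if_pos rfl, ih, if_true]
    · simp only [List.cons_append, mySplit, if_neg hd, ih]
      cases h : mySplit u with
      | nil => exact absurd h (mySplit_ne_nil u)
      | cons a t => simp

theorem mySplit_append_ch (u : List Char) {c : Char} (hc : c ≠ '\n') :
    mySplit (u ++ [c]) = (mySplit u).dropLast ++ [((mySplit u).getLast?.getD []) ++ [c]] := by
  induction u with
  | nil => simp [mySplit, hc]
  | cons d u ih =>
    by_cases hd : d = '\n'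
    · subst hd
      simp only [List.cons_append, mySplit, if_pos rfl, ih, if_true]
      cases h : mySplit u with
      | nil => exact absurd h (mySplit_ne_nil u)
      | cons a t => simp
    · simp only [List.cons_append, mySplit, if_neg hd, ih]
      cases h : mySplit u with
      | nil => exact absurd h (mySplit_ne_nil u)
      | cons a t =>
        cases t with
        | nil => simp
        | cons t1 t2 => simp

theorem gl_append_ws {c : Char} (u : List Char) (h : PySem.Chars.isspace c = true) :
    goodLabels (u ++ [c]) = goodLabels u := by
  unfold goodLabels
  by_cases hnl : c = '\n'
  · subst hnl
    rw [mySplit_append_nl, List.filter_append]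
    simp
  · rw [mySplit_append_ch u hnl]
    have hrep : mySplit u = (mySplit u).dropLast ++ [(mySplit u).getLast?.getD []] := by
      have hgl : (mySplit u).getLast?.getD [] = (mySplit u).getLast (mySplit_ne_nil u) := by
        rw [List.getLast?_eq_some_getLast (mySplit_ne_nil u)]; rfl
      rw [hgl]
      exact (List.dropLast_append_getLast (mySplit_ne_nil u)).symm
    conv_rhs => rw [hrep]
    rw [List.filter_append, List.filter_append, List.map_append, List.map_append]
    set last := (mySplit u).getLast?.getD [] with hlast
    have hmem : (':' ∈ last ++ [c]) ↔ (':' ∈ last) := by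
      simp [List.mem_append, (isspace_ne_colon h)]
      intro hh; exact absurd hh.symm (isspace_ne_colon h)
    by_cases h1 : ':' ∈ last
    · have hlab : labelOf (last ++ [c]) = labelOf last := by
        unfold labelOf
        rw [takeWhile_append_mem_false _ _ h1]
      by_cases h2 : labelOf last ≠ [] <;> simp [h1, h2, hmem, hlab, List.filter_cons]
    · simp [h1, hmem, List.filter_cons]

theorem gl_prepend_ws (ws r : List Char) (h : ∀ c ∈ ws, PySem.Chars.isspace c = true) :
    goodLabels (ws ++ r) = goodLabels r := by
  induction ws with
  | nil => simp
  | cons c ws ih =>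
    rw [List.cons_append, gl_cons_ws _ (h c (List.mem_cons_self ..)),
      ih (fun d hd => h d (List.mem_cons_of_mem _ hd))]

theorem gl_postpend_ws (ws : List Char) : ∀ (u : List Char), (∀ c ∈ ws, PySem.Chars.isspace c = true) →
    goodLabels (u ++ ws) = goodLabels u := by
  induction ws with
  | nil => simp
  | cons c ws ih =>
    intro u h
    have : u ++ c :: ws = (u ++ [c]) ++ ws := by simp
    rw [this, ih (u ++ [c]) (fun d hd => h d (List.mem_cons_of_mem _ hd)),
      gl_append_ws u (h c (List.mem_cons_self ..))]

theorem goodLabels_lstrip (t : List Char) : goodLabels (PySem.Chars.lstrip t) = goodLabels t := by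
  unfold PySem.Chars.lstrip
  conv_rhs => rw [← List.takeWhile_append_dropWhile (p := PySem.Chars.isspace) (l := t)]
  rw [gl_prepend_ws _ _ (fun c hc => List.mem_takeWhile_imp hc)]

theorem goodLabels_rstrip (t : List Char) : goodLabels (PySem.Chars.rstrip t) = goodLabels t := by
  unfold PySem.Chars.rstrip
  conv_rhs => rw [show t = ((List.takeWhile PySem.Chars.isspace t.reverse) ++ (List.dropWhile PySem.Chars.isspace t.reverse)).reverse by
    rw [List.takeWhile_append_dropWhile, List.reverse_reverse]]
  rw [List.reverse_append]
  rw [gl_postpend_ws _ _ (fun c hc => List.mem_takeWhile_imp (List.mem_reverse.mp hc))]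

theorem goodLabels_strip (t : List Char) : goodLabels (PySem.Chars.strip t) = goodLabels t := by
  unfold PySem.Chars.strip
  rw [goodLabels_rstrip, goodLabels_lstrip]

theorem A_eq (t : String) :
    count_speakers_in_text t =
      (PySem.Set.len ((goodLabels (PySem.Chars.strip t.toList)).foldl PySem.Set.add PySem.Set.empty) : Int) := by
  unfold count_speakers_in_text
  by_cases h0 : t = ""
  · subst h0
    rfl
  · rw [if_neg h0, splitOn_newline]
    show (PySem.Set.len (List.foldl aStep PySem.Set.empty (mySplit (PySem.Chars.strip t.toList))) : Int) = _
    rw [PySem.List.foldl_congr_mem (mySplit (PySem.Chars.strip t.toList)) aStep lineUpd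
      PySem.Set.empty (fun acc l _ => aStep_eq_lineUpd acc l)]
    rw [foldl_lineUpd_eq]

theorem B_eq (t : String) :
    count_speakers_in_text_alt t =
      (PySem.Set.len ((goodLabels t.toList).foldl PySem.Set.add PySem.Set.empty) : Int) := by
  unfold count_speakers_in_text_alt
  rw [machine t.toList PySem.Set.empty [] false (fun _ => by simp)]
  simp only [Bool.false_eq_true, if_false, List.nil_append]
  rw [← mySplit_rep t.toList, foldl_lineUpd_eq]

-- ===== VERDICT (by name: the statement is the Claim_ definition above) =====
theorem count_speakers_in_text_spec : Claim_equal_count_speakers_in_text := by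
  intro text _
  unfold Spec_count_speakers_in_text
  rw [A_eq, B_eq, goodLabels_strip]
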